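-- pv_equiv track=rewrite | github.com/gh0stintheshe11/LeetCode-Solutions | solutions/2167.minimum-time-to-remove-all-cars-containing-illegal-goods/Python3.py | minimumTime
-- ===== SOURCE A (Python) =====
-- def minimumTime(s: str) -> int:
--     n = len(s)
--     left_cost = [0] * n
--     right_cost = [0] * n
--
--     left_cost[0] = 1 if s[0] == '1' else 0
--     for i in range(1, n):
--         if s[i] == '1':
--             left_cost[i] = min(left_cost[i - 1] + 2, i + 1)
--         else:
--             left_cost[i] = left_cost[i - 1]
--
--     right_cost[n - 1] = 1 if s[n - 1] == '1' else 0
--     for i in range(n - 2, -1, -1):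
--         if s[i] == '1':
--             right_cost[i] = min(right_cost[i + 1] + 2, n - i)
--         else:
--             right_cost[i] = right_cost[i + 1]
--
--     result = min(left_cost[-1], right_cost[0])
--     for i in range(1, n):
--         result = min(result, left_cost[i - 1] + right_cost[i])
--
--     return result
-- ===== SOURCE B (Python) =====
-- def minimumTime(s: str) -> int:
--     n = len(s)
--     ans = n
--     left = 0
--     for i in range(n):
--         if s[i] == '1':
--             left = min(left + 2, i + 1)
--         ans = min(ans, left + (n - 1 - i))
--     return ans
-- ===== Notes on version B (the rewrite author's own statement) =====
-- stated objective: simpler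
-- what changed: B drops A's backward right_cost DP array and the separate split scan: a single forward pass keeps only the running left-DP value and minimises left + (n-1-i), the closed-form cost of peeling the whole suffix from the right.
import Mathlib
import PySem

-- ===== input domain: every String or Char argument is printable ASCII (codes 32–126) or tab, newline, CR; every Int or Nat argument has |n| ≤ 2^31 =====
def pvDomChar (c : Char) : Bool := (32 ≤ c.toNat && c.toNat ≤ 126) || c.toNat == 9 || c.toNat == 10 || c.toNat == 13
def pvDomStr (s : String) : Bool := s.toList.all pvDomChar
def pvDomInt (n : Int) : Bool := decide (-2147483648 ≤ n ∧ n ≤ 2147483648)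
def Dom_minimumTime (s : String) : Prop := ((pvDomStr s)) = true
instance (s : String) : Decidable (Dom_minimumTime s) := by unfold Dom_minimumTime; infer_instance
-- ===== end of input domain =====

-- B drops A's backward right_cost DP array and the separate split scan: one forward pass keeps the
-- left-DP value and minimises left + (n-1-i), the closed-form cost of peeling the suffix from the
-- right (objective: simpler; O(1) instead of O(n) extra space).

-- ===== PORT A =====
def minimumTime (s : String) : Int :=
  let cs := s.toList
  let n : Int := (cs.length : Int)
  let left_cost :=
    (PySem.List.pyRange 1 n 1).foldl
      (fun lc i =>
        if PySem.List.pyGetD cs i ' ' = '1' then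
          lc ++ [min (PySem.List.pyGetD lc (i - 1) 0 + 2) (i + 1)]
        else
          lc ++ [PySem.List.pyGetD lc (i - 1) 0])
      [if PySem.List.pyGetD cs 0 ' ' = '1' then (1 : Int) else 0]
  let right_cost :=
    (PySem.List.pyRange (n - 2) (-1) (-1)).foldl
      (fun rc i =>
        if PySem.List.pyGetD cs i ' ' = '1' then
          min (PySem.List.pyGetD rc 0 0 + 2) (n - i) :: rc
        else
          PySem.List.pyGetD rc 0 0 :: rc)
      [if PySem.List.pyGetD cs (n - 1) ' ' = '1' then (1 : Int) else 0]
  let result := min (PySem.List.pyGetD left_cost (-1) 0) (PySem.List.pyGetD right_cost 0 0)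
  (PySem.List.pyRange 1 n 1).foldl
    (fun r i => min r (PySem.List.pyGetD left_cost (i - 1) 0 + PySem.List.pyGetD right_cost i 0))
    result

-- ===== PORT B =====
def minimumTime_alt (s : String) : Int :=
  let cs := s.toList
  let n : Int := (cs.length : Int)
  ((PySem.List.pyRange 0 n 1).foldl
    (fun (st : Int × Int) i =>
      let left := if PySem.List.pyGetD cs i ' ' = '1' then min (st.2 + 2) (i + 1) else st.2
      (min st.1 (left + (n - 1 - i)), left))
    ((n : Int), 0)).1

-- ===== PRECONDITION & SPEC =====
-- Pre_ excludes exactly the empty string, on which A raises IndexError (s[0]).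
def Pre_minimumTime (s : String) : Prop := s ≠ ""
instance (s : String) : Decidable (Pre_minimumTime s) := by unfold Pre_minimumTime; infer_instance
def pvWitness_minimumTime : String := "1101"

def Spec_minimumTime (s : String) (out : Int) : Prop := out = minimumTime_alt s
instance (s : String) (out : Int) : Decidable (Spec_minimumTime s out) := by unfold Spec_minimumTime; infer_instance

-- ===== CLAIM (what is proved, stated in full; the proofs are below) =====
def Claim_equal_minimumTime : Prop := ∀ (s : String), Dom_minimumTime s → Pre_minimumTime s → Spec_minimumTime s (minimumTime s)

-- ===== LEMMAS AND PROOFS =====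

-- forward DP value: pvL cs i = A's left_cost[i-1] = cost of clearing the first i cars
def pvL (cs : List Char) : Nat → Int
  | 0 => 0
  | i + 1 => if cs.getD i ' ' = '1' then min (pvL cs i + 2) ((i : Int) + 1) else pvL cs i

-- backward DP value: pvS cs k = A's right_cost[n-k] = cost of clearing the last k cars
def pvS (cs : List Char) : Nat → Int
  | 0 => 0
  | k + 1 => if cs.getD (cs.length - 1 - k) ' ' = '1' then min (pvS cs k + 2) ((k : Int) + 1) else pvS cs k

theorem pyGetD_neg_one {α : Type} (xs : List α) (d : α) (h : 1 ≤ xs.length) :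
    PySem.List.pyGetD xs (-1) d = xs.getD (xs.length - 1) d := by
  simp [PySem.List.pyGetD, PySem.List.pyGet?, PySem.List.pyIdx?, h]

theorem pvL_one (cs : List Char) :
    (if PySem.List.pyGetD cs 0 ' ' = '1' then (1 : Int) else 0) = pvL cs 1 := by
  rw [show (0 : Int) = ((0 : Nat) : Int) from rfl, PySem.List.pyGetD_natCast]
  simp only [pvL]
  split <;> simp

theorem pvL_le_succ (cs : List Char) (i : Nat) : pvL cs (i + 1) ≤ pvL cs i + 2 := by
  simp only [pvL]
  split
  · exact min_le_left _ _
  · omega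

theorem pvS_le (cs : List Char) (k : Nat) : pvS cs k ≤ (k : Int) := by
  induction k with
  | zero => simp [pvS]
  | succ k ih =>
    simp only [pvS]
    split
    · exact le_trans (min_le_right _ _) (by push_cast; omega)
    · exact le_trans ih (by push_cast; omega)

-- characterisation of A's left_cost list
theorem left_fold_eq (cs : List Char) (m : Nat) (hm : 1 ≤ m) :
    (PySem.List.pyRange 1 (m : Int) 1).foldl
      (fun lc i =>
        if PySem.List.pyGetD cs i ' ' = '1' then
          lc ++ [min (PySem.List.pyGetD lc (i - 1) 0 + 2) (i + 1)]
        else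
          lc ++ [PySem.List.pyGetD lc (i - 1) 0])
      [if PySem.List.pyGetD cs 0 ' ' = '1' then (1 : Int) else 0]
    = (List.range m).map (fun i => pvL cs (i + 1)) := by
  induction m with
  | zero => omega
  | succ m ih =>
    by_cases h1 : 1 ≤ m
    · rw [show ((m + 1 : Nat) : Int) = (m : Int) + 1 by push_cast; ring,
        PySem.List.pyRange_one_succ_right (by exact_mod_cast h1),
        List.foldl_append, ih h1]
      simp only [List.foldl_cons, List.foldl_nil]
      rw [show ((m : Int) - 1) = ((m - 1 : Nat) : Int) by omega, PySem.List.pyGetD_natCast,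
        PySem.List.pyGetD_natCast,
        PySem.List.getD_map_range _ _ _ _ (by omega : m - 1 < m),
        List.range_succ, List.map_append]
      have hm1 : m - 1 + 1 = m := by omega
      rw [hm1]
      simp only [pvL, List.map_cons, List.map_nil]
      split <;> simp
    · have hm0 : m = 0 := by omega
      subst hm0
      rw [show ((0 + 1 : Nat) : Int) = 1 by norm_num, PySem.List.pyRange_one_eq_nil le_rfl]
      simp [pvL_one]

-- characterisation of A's right_cost list, downward induction on the next index to fill
theorem right_fold_eq (cs : List Char) (n : Nat) (hn : n = cs.length) (i : Nat) (hi : i + 1 ≤ n) :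
    (PySem.List.pyRange ((i : Int) - 1) (-1) (-1)).foldl
      (fun rc j =>
        if PySem.List.pyGetD cs j ' ' = '1' then
          min (PySem.List.pyGetD rc 0 0 + 2) ((n : Int) - j) :: rc
        else
          PySem.List.pyGetD rc 0 0 :: rc)
      ((List.range (n - i)).map (fun j => pvS cs (n - i - j)))
    = (List.range n).map (fun j => pvS cs (n - j)) := by
  induction i with
  | zero =>
    rw [show ((0 : Nat) : Int) - 1 = (-1 : Int) from rfl, PySem.List.pyRange_neg_one_eq_nil le_rfl]
    simp
  | succ i ih =>
    rw [show ((i + 1 : Nat) : Int) - 1 = (i : Int) by push_cast; ring,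
      PySem.List.pyRange_neg_one_cons (by omega : (-1 : Int) < (i : Int))]
    simp only [List.foldl_cons]
    have hacc : (PySem.List.pyGetD ((List.range (n - (i + 1))).map (fun j => pvS cs (n - (i + 1) - j))) 0 0)
        = pvS cs (n - i - 1) := by
      rw [show (0 : Int) = ((0 : Nat) : Int) from rfl, PySem.List.pyGetD_natCast,
        PySem.List.getD_map_range _ _ _ _ (by omega : 0 < n - (i + 1))]
      congr 1
    have hstep :
        (if PySem.List.pyGetD cs (i : Int) ' ' = '1' then
            min (pvS cs (n - i - 1) + 2) ((n : Int) - (i : Int)) :: (List.range (n - (i + 1))).map (fun j => pvS cs (n - (i + 1) - j))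
          else
            pvS cs (n - i - 1) :: (List.range (n - (i + 1))).map (fun j => pvS cs (n - (i + 1) - j)))
        = (List.range (n - i)).map (fun j => pvS cs (n - i - j)) := by
      have hr : n - i = (n - i - 1) + 1 := by omega
      have hhead : pvS cs (n - i - 1 + 1) =
          if PySem.List.pyGetD cs (i : Int) ' ' = '1' then
            min (pvS cs (n - i - 1) + 2) ((n : Int) - (i : Int))
          else pvS cs (n - i - 1) := by
        simp only [pvS]
        rw [PySem.List.pyGetD_natCast, ← hn, show n - 1 - (n - i - 1) = i by omega,
          show ((n - i - 1 : Nat) : Int) + 1 = (n : Int) - (i : Int) by omega]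
      have htail : (List.range (n - (i + 1))).map (fun j => pvS cs (n - (i + 1) - j))
          = (List.range (n - i - 1)).map ((fun j => pvS cs (n - i - 1 + 1 - j)) ∘ Nat.succ) := by
        rw [show n - (i + 1) = n - i - 1 by omega]
        apply List.map_congr_left
        intro j hj
        simp only [Function.comp]
        congr 1
        omega
      conv_rhs => rw [hr, List.range_succ_eq_map]
      rw [List.map_cons, List.map_map, ← htail, Nat.sub_zero, hhead]
      split <;> rfl
    rw [hacc, hstep]
    exact ih (by omega)

-- B's running answer after the whole loop (and A's split scan, both as Nat folds)
def pvAns (cs : List Char) (n : Nat) : Int :=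
  (List.range n).foldl (fun r k => min r (pvL cs (k + 1) + ((n : Int) - 1 - (k : Int)))) (n : Int)

def pvX (cs : List Char) (n : Nat) : Int :=
  (List.range (n - 1)).foldl (fun r k => min r (pvL cs (k + 1) + pvS cs (n - (k + 1))))
    (min (pvL cs n) (pvS cs n))

-- characterisation of B's fold state
theorem b_fold_eq (cs : List Char) (n : Nat) (m : Nat) :
    ((List.range m).foldl
      (fun (st : Int × Int) (k : Nat) =>
        let left := if PySem.List.pyGetD cs ((k : Nat) : Int) ' ' = '1' then min (st.2 + 2) (((k : Nat) : Int) + 1) else st.2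
        (min st.1 (left + ((n : Int) - 1 - ((k : Nat) : Int))), left))
      ((n : Int), 0))
    = ((List.range m).foldl (fun r k => min r (pvL cs (k + 1) + ((n : Int) - 1 - (k : Int)))) (n : Int), pvL cs m) := by
  induction m with
  | zero => simp [pvL]
  | succ m ih =>
    rw [List.range_succ, List.foldl_append, List.foldl_append, ih]
    simp only [List.foldl_cons, List.foldl_nil]
    rw [PySem.List.pyGetD_natCast]
    simp only [pvL]

theorem pvAns_le (cs : List Char) (n i : Nat) (hi : i ≤ n) :
    pvAns cs n ≤ pvL cs i + ((n : Int) - (i : Int)) := by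
  rw [pvAns, ← List.foldl_map]
  rcases Nat.eq_zero_or_pos i with h0 | hpos
  · subst h0
    have := (PySem.List.foldl_min_le ((List.range n).map (fun k => pvL cs (k + 1) + ((n : Int) - 1 - (k : Int)))) (n : Int)).1
    have h0 : pvL cs 0 = 0 := rfl
    rw [h0]
    omega
  · have hmem : pvL cs i + ((n : Int) - (i : Int) - 1 + 1) ∈
        (List.range n).map (fun k => pvL cs (k + 1) + ((n : Int) - 1 - (k : Int))) := by
      refine List.mem_map.mpr ⟨i - 1, List.mem_range.mpr (by omega), ?_⟩
      rw [show i - 1 + 1 = i by omega]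
      congr 1
      omega
    have := (PySem.List.foldl_min_le ((List.range n).map (fun k => pvL cs (k + 1) + ((n : Int) - 1 - (k : Int)))) (n : Int)).2 _ hmem
    omega

theorem pvAns_mem (cs : List Char) (n : Nat) :
    ∃ i, i ≤ n ∧ pvAns cs n = pvL cs i + ((n : Int) - (i : Int)) := by
  rw [pvAns, ← List.foldl_map]
  rcases PySem.List.foldl_min_mem ((List.range n).map (fun k => pvL cs (k + 1) + ((n : Int) - 1 - (k : Int)))) (n : Int) with h | h
  · exact ⟨0, by omega, by rw [h]; simp [pvL]⟩
  · rcases List.mem_map.mp h with ⟨k, hk, hv⟩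
    refine ⟨k + 1, List.mem_range.mp hk, ?_⟩
    rw [← hv]
    push_cast
    ring

theorem pvX_le (cs : List Char) (n : Nat) (hn1 : 1 ≤ n) (i : Nat) (hi : i ≤ n) :
    pvX cs n ≤ pvL cs i + pvS cs (n - i) := by
  rw [pvX, ← List.foldl_map]
  have hinit := (PySem.List.foldl_min_le
    ((List.range (n - 1)).map (fun k => pvL cs (k + 1) + pvS cs (n - (k + 1))))
    (min (pvL cs n) (pvS cs n))).1
  rcases Nat.eq_zero_or_pos i with h0 | hpos
  · subst h0
    have : min (pvL cs n) (pvS cs n) ≤ pvS cs n := min_le_right _ _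
    have h0 : pvL cs 0 = 0 := rfl
    rw [h0, Nat.sub_zero]
    omega
  · rcases Nat.lt_or_ge i n with hlt | hge
    · have hmem : pvL cs i + pvS cs (n - i) ∈
          (List.range (n - 1)).map (fun k => pvL cs (k + 1) + pvS cs (n - (k + 1))) := by
        refine List.mem_map.mpr ⟨i - 1, List.mem_range.mpr (by omega), ?_⟩
        rw [show i - 1 + 1 = i by omega]
      exact (PySem.List.foldl_min_le _ _).2 _ hmem
    · have hi' : i = n := by omega
      rw [hi', Nat.sub_self]
      have h0 : pvS cs 0 = 0 := rfl
      rw [h0]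
      have : min (pvL cs n) (pvS cs n) ≤ pvL cs n := min_le_left _ _
      omega

theorem pvX_mem (cs : List Char) (n : Nat) :
    ∃ i, i ≤ n ∧ pvX cs n = pvL cs i + pvS cs (n - i) := by
  rw [pvX, ← List.foldl_map]
  rcases PySem.List.foldl_min_mem
      ((List.range (n - 1)).map (fun k => pvL cs (k + 1) + pvS cs (n - (k + 1))))
      (min (pvL cs n) (pvS cs n)) with h | h
  · rcases min_cases (pvL cs n) (pvS cs n) with ⟨he, _⟩ | ⟨he, _⟩
    · exact ⟨n, le_rfl, by rw [h, he]; simp [pvS]⟩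
    · exact ⟨0, Nat.zero_le n, by rw [h, he]; simp [pvL]⟩
  · rcases List.mem_map.mp h with ⟨k, hk, hv⟩
    exact ⟨k + 1, by have := List.mem_range.mp hk; omega, by rw [hv]⟩

-- the crux: a split that clears the suffix by the backward DP is never better than the best
-- "peel the whole suffix from the right" split
theorem key_ge (cs : List Char) (n : Nat) (hn : n = cs.length) (k : Nat) (hk : k ≤ n) :
    ∃ j, j ≤ n ∧ pvL cs j + ((n : Int) - (j : Int)) ≤ pvL cs (n - k) + pvS cs k := by
  induction k with
  | zero => exact ⟨n, le_rfl, by simp [pvS]⟩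
  | succ k ih =>
    obtain ⟨j, hj, hjle⟩ := ih (by omega)
    simp only [pvS]
    rw [← hn, show n - 1 - k = n - k - 1 by omega]
    by_cases h1 : cs.getD (n - k - 1) ' ' = '1'
    · rw [if_pos h1]
      rcases le_total (pvS cs k + 2) ((k : Int) + 1) with hmin | hmin
      · refine ⟨j, hj, ?_⟩
        rw [min_eq_left hmin]
        have hstep : pvL cs (n - k) ≤ pvL cs (n - (k + 1)) + 2 := by
          have h := pvL_le_succ cs (n - (k + 1))
          rwa [show n - (k + 1) + 1 = n - k by omega] at h
        omega
      · refine ⟨n - (k + 1), by omega, ?_⟩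
        rw [min_eq_right hmin]
        have : ((n : Int) - ((n - (k + 1) : Nat) : Int)) = (k : Int) + 1 := by omega
        omega
    · rw [if_neg h1]
      refine ⟨j, hj, ?_⟩
      have hLeq : pvL cs (n - k) = pvL cs (n - (k + 1)) := by
        rw [show n - k = (n - (k + 1)) + 1 by omega]
        simp only [pvL]
        rw [if_neg (by rwa [show n - (k + 1) = n - k - 1 by omega])]
      omega

theorem pvX_eq_pvAns (cs : List Char) (n : Nat) (hn : n = cs.length) (hn1 : 1 ≤ n) :
    pvX cs n = pvAns cs n := by
  apply le_antisymm
  · obtain ⟨i, hi, he⟩ := pvAns_mem cs n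
    rw [he]
    calc pvX cs n ≤ pvL cs i + pvS cs (n - i) := pvX_le cs n hn1 i hi
      _ ≤ pvL cs i + ((n : Int) - (i : Int)) := by
          have := pvS_le cs (n - i)
          have hc : ((n - i : Nat) : Int) = (n : Int) - (i : Int) := by omega
          omega
  · obtain ⟨i, hi, he⟩ := pvX_mem cs n
    obtain ⟨j, hj, hle⟩ := key_ge cs n hn (n - i) (by omega)
    rw [show n - (n - i) = i by omega] at hle
    rw [he]
    exact le_trans (pvAns_le cs n j hj) hle

-- ===== VERDICT (by name: the statement is the Claim_ definition above) =====
theorem minimumTime_spec : Claim_equal_minimumTime := by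
  intro s _ hpre
  unfold Spec_minimumTime
  have hne : s.toList ≠ [] := by
    intro h
    apply hpre
    have := congrArg String.ofList h
    rwa [String.ofList_toList] at this
  set cs := s.toList with hcs
  have hn1 : 1 ≤ cs.length := List.length_pos_iff.mpr hne
  set n := cs.length with hn
  -- A's side
  have hA : minimumTime s = pvX cs n := by
    simp only [minimumTime, ← hcs, ← hn]
    rw [left_fold_eq cs n hn1]
    have hrinit : (List.range (n - (n - 1))).map (fun j => pvS cs (n - (n - 1) - j))
        = [if PySem.List.pyGetD cs ((n : Int) - 1) ' ' = '1' then (1 : Int) else 0] := by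
      rw [show n - (n - 1) = 1 by omega]
      simp only [List.range_one, List.map_cons, List.map_nil]
      rw [show ((n : Int) - 1) = ((n - 1 : Nat) : Int) by omega, PySem.List.pyGetD_natCast]
      simp only [pvS, Nat.sub_zero]
      split <;> norm_num
    have hrc := right_fold_eq cs n hn (n - 1) (by omega)
    rw [show ((n - 1 : Nat) : Int) - 1 = (n : Int) - 2 by omega, hrinit] at hrc
    rw [hrc]
    -- the three direct accesses
    rw [pyGetD_neg_one _ _ (by simp; omega)]
    simp only [List.length_map, List.length_range]
    rw [PySem.List.getD_map_range _ _ _ _ (show n - 1 < n by omega), show n - 1 + 1 = n by omega]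
    rw [PySem.List.pyGetD_ofNat' ((List.range n).map (fun j => pvS cs (n - j))) 0 0,
      PySem.List.getD_map_range _ _ _ _ (show 0 < n by omega), Nat.sub_zero]
    -- the final split scan
    rw [PySem.List.pyRange_one, show ((n : Int) - 1).toNat = n - 1 by omega, List.foldl_map]
    rw [pvX]
    apply PySem.List.foldl_congr_mem
    intro acc k hk
    have hk' : k < n - 1 := List.mem_range.mp hk
    rw [show (1 : Int) + (k : Int) - 1 = ((k : Nat) : Int) by ring, PySem.List.pyGetD_natCast,
      PySem.List.getD_map_range _ _ _ _ (show k < n by omega),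
      show (1 : Int) + (k : Int) = ((k + 1 : Nat) : Int) by push_cast; ring,
      PySem.List.pyGetD_natCast,
      PySem.List.getD_map_range _ _ _ _ (show k + 1 < n by omega)]
  -- B's side
  have hB : minimumTime_alt s = pvAns cs n := by
    simp only [minimumTime_alt, ← hcs, ← hn]
    rw [PySem.List.pyRange_zero_natCast, List.foldl_map, b_fold_eq cs n n, pvAns]
  rw [hA, hB]
  exact pvX_eq_pvAns cs n hn hn1
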